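-- pv_equiv track=rewrite | github.com/ThibaudPiccinali/STA-Dr-ne | Repartition taches/repartition_final.py | choix_paires
-- ===== SOURCE A (Python) =====
-- def choix_paires(L):  #Dans le cas où le rallongement du chemin se fait par un coté "long", on peut choisir de rallonger le chemin n'importe où, tant que deux cases sont adjacentes. Il y a donc une multitude de choix différents, il faut choisir les bonnes paires de tuiles pour rallonger le chemin. Cette fonction par reccurence compare les choix entre eux et selectionne le meilleurs.
--     n = len(L)
--     if(n == 0):
--         return([],0)
--     if(n == 1):
--         return([0],0)
--
--     if(len(L) == 2):
--         if(L[0] != 0 and L[1] != 0):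
--             return([1,1],min(L)*2)
--         else:
--              return([0,0],min(L)*2)
--     (choix1,resultat_si_pas_choisis) = choix_paires(L[1:])
--     mi = min(L[0],L[1])
--     if(mi != 0):
--         (choix2,resu) = choix_paires(L[2:])
--         resultat_si_choisis = 2*mi + resu
--         if(resultat_si_pas_choisis > resultat_si_choisis):
--             return([0]+choix1 , resultat_si_pas_choisis)
--         else:
--             return([1,1]+choix2 , resultat_si_choisis)
--     else:
--         return([0] + choix1 , resultat_si_pas_choisis)
-- ===== SOURCE B (Python) =====
-- def choix_paires(L):
--     # Linear right-to-left DP over adjacent pairs (A's exponential recursion memoized away).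
--     n = len(L)
--     if n == 0:
--         return ([], 0)
--     if n == 1:
--         return ([0], 0)
--     pairs = list(zip(L, L[1:]))
--     a, b = pairs[-1]
--     if a != 0 and b != 0:
--         s1 = ([1, 1], min(a, b) * 2)
--     else:
--         s1 = ([0, 0], min(a, b) * 2)
--     s2 = ([0], 0)
--     for (a, b) in reversed(pairs[:-1]):
--         mi = min(a, b)
--         c1, r1 = s1
--         if mi != 0:
--             c2, r2 = s2
--             rc = 2 * mi + r2
--             if r1 > rc:
--                 new = ([0] + c1, r1)
--             else:
--                 new = ([1, 1] + c2, rc)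
--         else:
--             new = ([0] + c1, r1)
--         s1, s2 = new, s1
--     return s1
-- ===== Notes on version B (the rewrite author's own statement) =====
-- stated objective: faster
-- what changed: Intended as faster (measured 12x at the largest size both finished; A timed out beyond that): A's exponential branching recursion over suffixes is replaced by a single right-to-left dynamic-programming fold over adjacent pairs carrying the last two suffix solutions (back-pointer-free reconstruction, same tie-break favoring selection).
import Mathlib
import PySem

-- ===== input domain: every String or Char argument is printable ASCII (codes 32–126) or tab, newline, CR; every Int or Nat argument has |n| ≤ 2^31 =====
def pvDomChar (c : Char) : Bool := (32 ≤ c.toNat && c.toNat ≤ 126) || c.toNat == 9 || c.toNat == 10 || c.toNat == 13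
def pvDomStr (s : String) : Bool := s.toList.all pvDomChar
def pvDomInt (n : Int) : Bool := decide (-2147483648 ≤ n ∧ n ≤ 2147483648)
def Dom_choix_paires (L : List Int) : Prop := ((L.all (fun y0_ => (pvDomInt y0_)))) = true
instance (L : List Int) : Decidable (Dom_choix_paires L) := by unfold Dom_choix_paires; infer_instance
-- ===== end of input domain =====

-- B replaces A's branching recursion by a single right-to-left DP fold over adjacent pairs; intended as faster (measured 12x at the largest size both finished; A timed out beyond that where B returned).

-- ===== PORT A =====
-- literal transliteration of A's recursion (min(L) on a 2-element list = min L[0] L[1])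
def choix_paires : List Int → List Int × Int
  | [] => ([], 0)
  | [_] => ([0], 0)
  | [a, b] =>
    if a ≠ 0 ∧ b ≠ 0 then ([1, 1], min a b * 2) else ([0, 0], min a b * 2)
  | a :: b :: c :: rest =>
    let p1 := choix_paires (b :: c :: rest)
    let choix1 := p1.1
    let resultat_si_pas_choisis := p1.2
    let mi := min a b
    if mi ≠ 0 then
      let p2 := choix_paires (c :: rest)
      let resultat_si_choisis := 2 * mi + p2.2
      if resultat_si_pas_choisis > resultat_si_choisis then
        (0 :: choix1, resultat_si_pas_choisis)
      else
        (1 :: 1 :: p2.1, resultat_si_choisis)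
    else (0 :: choix1, resultat_si_pas_choisis)

-- ===== PORT B =====
-- fold step of Source B's loop: state = (dp for suffix i+1, dp for suffix i+2), pair = (L[i], L[i+1])
def cpStep (st : (List Int × Int) × (List Int × Int)) (p : Int × Int) :
    (List Int × Int) × (List Int × Int) :=
  let s1 := st.1
  let mi := min p.1 p.2
  if mi ≠ 0 then
    let rc := 2 * mi + st.2.2
    if s1.2 > rc then ((0 :: s1.1, s1.2), s1) else ((1 :: 1 :: st.2.1, rc), s1)
  else ((0 :: s1.1, s1.2), s1)

-- Source B's base value from the last adjacent pair (pairs[-1]; pairs is nonempty whenever this is used)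
def cpInit (pairs : List (Int × Int)) : List Int × Int :=
  match pairs.getLast? with
  | some p =>
    if p.1 ≠ 0 ∧ p.2 ≠ 0 then ([1, 1], min p.1 p.2 * 2) else ([0, 0], min p.1 p.2 * 2)
  | none => ([], 0)

def choix_paires_alt (L : List Int) : List Int × Int :=
  match L with
  | [] => ([], 0)
  | [_] => ([0], 0)
  | _ =>
    let pairs := L.zip L.tail
    (pairs.dropLast.reverse.foldl cpStep (cpInit pairs, ([0], 0))).1

-- ===== PRECONDITION & SPEC =====
def Spec_choix_paires (L : List Int) (out : List Int × Int) : Prop := out = choix_paires_alt L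
instance (L : List Int) (out : List Int × Int) : Decidable (Spec_choix_paires L out) := by unfold Spec_choix_paires; infer_instance

-- ===== CLAIM (what is proved, stated in full; the proofs are below) =====
def Claim_equal_choix_paires : Prop := ∀ (L : List Int), Dom_choix_paires L → Spec_choix_paires L (choix_paires L)

-- ===== LEMMAS AND PROOFS =====

-- the fold over all but the last adjacent pair (reversed) computes (dp L, dp L.tail)
theorem cp_fold_eq (L : List Int) (h : 2 ≤ L.length) :
    ((L.zip L.tail).dropLast.reverse).foldl cpStep (cpInit (L.zip L.tail), ([0], 0))
      = (choix_paires L, choix_paires L.tail) := by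
  induction L with
  | nil => simp at h
  | cons a t ih =>
    match t with
    | [] => simp at h
    | [b] =>
      show (cpInit [(a, b)], (([0], 0) : List Int × Int)) = _
      simp [cpInit, choix_paires]
    | b :: c :: rest =>
      have ih' := ih (by simp)
      have hzip : ((a :: b :: c :: rest).zip (a :: b :: c :: rest).tail)
          = (a, b) :: ((b :: c :: rest).zip (b :: c :: rest).tail) := by simp
      rw [hzip]
      have hne : ((b :: c :: rest).zip (b :: c :: rest).tail) ≠ [] := by simp
      have hzip2 : ((b :: c :: rest).zip (b :: c :: rest).tail)
          = (b, c) :: ((c :: rest).zip rest) := by simp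
      have hinit : cpInit ((a, b) :: ((b :: c :: rest).zip (b :: c :: rest).tail))
          = cpInit ((b :: c :: rest).zip (b :: c :: rest).tail) := by
        unfold cpInit
        rw [hzip2, List.getLast?_cons_cons]
      rw [hinit]
      rw [List.dropLast_cons_of_ne_nil hne, List.reverse_cons, List.foldl_append, ih']
      show cpStep (choix_paires (b :: c :: rest), choix_paires (c :: rest)) (a, b)
        = (choix_paires (a :: b :: c :: rest), choix_paires (b :: c :: rest))
      simp only [cpStep, choix_paires]
      by_cases hmi : min a b ≠ 0 <;> simp [hmi] <;> split <;> simp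

-- ===== VERDICT (by name: the statement is the Claim_ definition above) =====
theorem choix_paires_spec : Claim_equal_choix_paires := by
  intro L _
  unfold Spec_choix_paires
  match L with
  | [] => rfl
  | [_] => rfl
  | a :: b :: t =>
    have halt : choix_paires_alt (a :: b :: t)
        = ((((a :: b :: t).zip (b :: t)).dropLast.reverse).foldl cpStep
            (cpInit ((a :: b :: t).zip (b :: t)), ([0], 0))).1 := rfl
    rw [halt]
    have := cp_fold_eq (a :: b :: t) (by simp)
    simp only [List.tail_cons] at this ⊢
    rw [this]
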